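-- pv_equiv track=rewrite | github.com/milosgacanovic/wiki-ai-translation | src/bot/translate_page.py | _find_balanced_template_end
-- ===== SOURCE A (Python) =====
-- def _find_balanced_template_end(text: str, start: int) -> int | None:
--     i = start
--     depth = 0
--     n = len(text)
--     while i < n - 1:
--         if text.startswith("{{", i):
--             depth += 1
--             i += 2
--             continue
--         if text.startswith("}}", i) and depth > 0:
--             depth -= 1
--             i += 2
--             if depth == 0:
--                 return i
--             continue
--         i += 1
--     return None
-- ===== SOURCE B (Python) =====
-- def _find_end_after_open(text, pos):
--     # pos is just past an unmatched '{{'; return the index just past its matching '}}'.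
--     # Recursive descent on the nesting structure: no depth counter.
--     while True:
--         j = text.find("}}", pos)
--         if j == -1:
--             return None
--         k = text.find("{{", pos)
--         if k != -1 and k < j:
--             inner = _find_end_after_open(text, k + 2)
--             if inner is None:
--                 return None
--             pos = inner
--         else:
--             return j + 2
--
--
-- def _find_balanced_template_end(text: str, start: int) -> int | None:
--     i = text.find("{{", start)
--     if i == -1:
--         return None
--     return _find_end_after_open(text, i + 2)
-- ===== Notes on version B (the rewrite author's own statement) =====
-- stated objective: faster
-- what changed: B replaces A's single character-pointer scan with a depth counter by recursive descent on the nesting structure: it locates the first '{{' with str.find, then a recursive helper matches one open template at a time by comparing the positions of the next '}}' and the next '{{' (recursing into nested templates), with no depth variable; the timed check measured B 36x faster at the largest size because scanning is done by str.find's C loop instead of a per-character Python loop.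
-- outside the precondition, e.g. on _find_balanced_template_end('{{}}', -4): A returns 0, B returns 4; on _find_balanced_template_end('{{}}}', -5): A returns -1, B returns 4; on _find_balanced_template_end('{{}}', -1): A returns 4, B returns None
import Mathlib
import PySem

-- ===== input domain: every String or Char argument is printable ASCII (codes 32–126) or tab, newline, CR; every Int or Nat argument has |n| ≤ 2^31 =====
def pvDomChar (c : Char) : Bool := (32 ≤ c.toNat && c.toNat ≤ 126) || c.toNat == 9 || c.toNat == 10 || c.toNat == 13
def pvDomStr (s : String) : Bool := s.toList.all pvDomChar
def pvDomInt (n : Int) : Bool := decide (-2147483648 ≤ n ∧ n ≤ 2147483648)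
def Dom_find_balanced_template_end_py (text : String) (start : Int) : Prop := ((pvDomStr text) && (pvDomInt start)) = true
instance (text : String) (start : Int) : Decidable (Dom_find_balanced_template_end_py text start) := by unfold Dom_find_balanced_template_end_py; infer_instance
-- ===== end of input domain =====

-- B replaces A's depth-counter character scan by recursive descent on the nesting structure via
-- str.find (measurably faster in a timing run); equivalence with A is proved for start ≥ 0.


-- ===== PORT A =====
-- text.startswith(p, i): Python clamps a negative start offset to max(n+i, 0); exact for ASCII input
def pyStartswith2 (cs : List Char) (p : List Char) (i : Int) : Bool :=
  let n : Int := cs.length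
  let j : Int := if i < 0 then max (n + i) 0 else i
  List.isPrefixOf p (cs.drop j.toNat)

-- A's while-loop: pointer i, depth counter
def pyALoop (cs : List Char) (i : Int) (depth : Int) : Option Int :=
  if i < (cs.length : Int) - 1 then
    if pyStartswith2 cs ['{','{'] i then
      pyALoop cs (i + 2) (depth + 1)
    else if pyStartswith2 cs ['}','}'] i && depth > 0 then
      (if depth - 1 = 0 then some (i + 2) else pyALoop cs (i + 2) (depth - 1))
    else
      pyALoop cs (i + 1) depth
  else
    none
termination_by ((cs.length : Int) - 1 - i).toNat
decreasing_by all_goals simp_all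

def find_balanced_template_end_py (text : String) (start : Int) : Option Int :=
  pyALoop text.toList start 0

-- ===== PORT B =====
-- Source B's _find_end_after_open: pos is just past an unmatched '{{'; return the index just past its
-- matching '}}'. text.find(sub, pos) is ported as PySem.Chars.findFrom. The Nat fuel only makes the
-- recursion well-founded (each call strictly advances pos, so the fuel chosen below never runs out);
-- it mirrors no Python construct.
def pyCloseB (cs : List Char) (pos : Int) : Nat → Option Int
  | 0 => none
  | f + 1 =>
    let j := PySem.Chars.findFrom cs ['}','}'] pos
    if j = -1 then none
    else
      let k := PySem.Chars.findFrom cs ['{','{'] pos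
      if k ≠ -1 ∧ k < j then
        match pyCloseB cs (k + 2) f with
        | none => none
        | some e => pyCloseB cs e f
      else some (j + 2)

def find_balanced_template_end_py_alt (text : String) (start : Int) : Option Int :=
  let cs := text.toList
  let i := PySem.Chars.findFrom cs ['{','{'] start
  if i = -1 then none else pyCloseB cs (i + 2) (cs.length + 1)

-- ===== PRECONDITION & SPEC =====
-- Pre_ excludes negative start, on which str.startswith's negative-offset clamping makes A's scan
-- positions and return values accidental (A can return a shifted index such as 0, or even -1, on
-- ("{{}}", -4) / ("{{}}}", -5)), while B's str.find interprets a negative start as a slice bound.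
def Pre_find_balanced_template_end_py (_text : String) (start : Int) : Prop := 0 ≤ start
instance (text : String) (start : Int) : Decidable (Pre_find_balanced_template_end_py text start) := by unfold Pre_find_balanced_template_end_py; infer_instance

def pvWitness_find_balanced_template_end_py : String × Int := ("{{x}}", 0)

def Spec_find_balanced_template_end_py (text : String) (start : Int) (out : Option Int) : Prop := out = find_balanced_template_end_py_alt text start
instance (text : String) (start : Int) (out : Option Int) : Decidable (Spec_find_balanced_template_end_py text start out) := by unfold Spec_find_balanced_template_end_py; infer_instance

-- ===== CLAIM (what is proved, stated in full; the proofs are below) =====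
def Claim_equal_find_balanced_template_end_py : Prop := ∀ (text : String) (start : Int), Dom_find_balanced_template_end_py text start → Pre_find_balanced_template_end_py text start → Spec_find_balanced_template_end_py text start (find_balanced_template_end_py text start)

-- ===== LEMMAS AND PROOFS =====

theorem sw_iff (cs p : List Char) (i : Int) (hi : 0 ≤ i) :
    pyStartswith2 cs p i = true ↔ p <+: cs.drop i.toNat := by
  simp only [pyStartswith2]
  have hj : (if i < 0 then max ((cs.length : Int) + i) 0 else i) = i := by omega
  rw [hj, List.isPrefixOf_iff_prefix]

-- a prefix further right is an infix of the earlier drop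
theorem prefix_drop_mono (cs p : List Char) (a b : Nat) (hab : a ≤ b)
    (h : p <+: cs.drop b) : p <:+: cs.drop a := by
  have hdd : cs.drop b = (cs.drop a).drop (b - a) := by
    rw [List.drop_drop]; congr 1; omega
  rw [hdd] at h
  exact h.isInfix.trans (List.drop_suffix _ _).isInfix

-- one depth-preserving step of A over a position holding no relevant token
theorem aloop_step (cs : List Char) (d : Int) (p : Int) (hp : 0 ≤ p)
    (hopen : ¬ (['{','{'] <+: cs.drop p.toNat))
    (hclose : 0 < d → ¬ (['}','}'] <+: cs.drop p.toNat)) :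
    pyALoop cs p d = pyALoop cs (p + 1) d := by
  rw [pyALoop]
  by_cases hlt : p < (cs.length : Int) - 1
  · have hno : pyStartswith2 cs ['{','{'] p = false := by
      rw [Bool.eq_false_iff, Ne, sw_iff cs _ p hp]; exact hopen
    by_cases hd : 0 < d
    · have hnc : pyStartswith2 cs ['}','}'] p = false := by
        rw [Bool.eq_false_iff, Ne, sw_iff cs _ p hp]; exact hclose hd
      simp [hlt, hno, hnc]
    · have hdf : ¬ (d > 0) := hd
      simp [hlt, hno, hdf]
  · conv_rhs => rw [pyALoop]
    have h2 : ¬ (p + 1 < (cs.length : Int) - 1) := by omega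
    simp [hlt, h2]

-- skipping k token-free positions
theorem aloop_skip (cs : List Char) (d : Int) (k : Nat) : ∀ p : Int, 0 ≤ p →
    (∀ r : Nat, p.toNat ≤ r → r < p.toNat + k →
      ¬ (['{','{'] <+: cs.drop r) ∧ (0 < d → ¬ (['}','}'] <+: cs.drop r))) →
    pyALoop cs p d = pyALoop cs (p + k) d := by
  induction k with
  | zero => intro p _ _; simp
  | succ m ih =>
    intro p hp h
    have h0 := h p.toNat (le_refl _) (by omega)
    rw [aloop_step cs d p hp h0.1 h0.2]
    have := ih (p + 1) (by omega) (by
      intro r hr1 hr2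
      exact h r (by omega) (by omega))
    rw [this]; congr 1; push_cast; ring

-- an infix of a later drop is an infix of an earlier one
theorem infix_drop_le (cs a : List Char) (p q : Nat) (hpq : p ≤ q)
    (h : a <:+: cs.drop q) : a <:+: cs.drop p := by
  have hdd : cs.drop q = (cs.drop p).drop (q - p) := by
    rw [List.drop_drop]; congr 1; omega
  rw [hdd] at h
  exact h.trans (List.drop_suffix _ _).isInfix

-- '{{' and '}}' cannot both start at the same position
theorem not_open_at_close (cs : List Char) (i : Nat)
    (hc : ['}','}'] <+: cs.drop i) : ¬ (['{','{'] <+: cs.drop i) := by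
  intro ho
  rcases hc with ⟨t1, h1⟩
  rcases ho with ⟨t2, h2⟩
  rw [← h1] at h2
  simp at h2

-- a length-2 prefix at index i forces i + 2 ≤ length
theorem found_ub (cs sub : List Char) (i : Nat) (hs : sub ≠ []) (h : sub <+: cs.drop i) :
    i + sub.length ≤ cs.length := by
  have h1 := h.length_le
  simp only [List.length_drop] at h1
  by_cases hi : i ≤ cs.length
  · omega
  · exfalso
    rw [List.drop_eq_nil_of_le (by omega)] at h
    exact hs (List.prefix_nil.mp h)

-- str.find(sub, pos) for 0 ≤ pos ≤ len: the spec of the first occurrence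
theorem ff_facts (cs sub : List Char) (pos : Int) (h0 : 0 ≤ pos) (hn : pos ≤ (cs.length : Int))
    (hne : PySem.Chars.findFrom cs sub pos ≠ -1) :
    pos ≤ PySem.Chars.findFrom cs sub pos ∧
    sub <+: cs.drop (PySem.Chars.findFrom cs sub pos).toNat ∧
    (∀ i : Nat, pos.toNat ≤ i → i < (PySem.Chars.findFrom cs sub pos).toNat →
      ¬ sub <+: cs.drop i) := by
  have hcast : pos = ((pos.toNat : Nat) : Int) := (Int.toNat_of_nonneg h0).symm
  rw [hcast] at hne ⊢
  have h := PySem.Chars.findFrom_natCast_spec cs sub pos.toNat (by omega) hne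
  exact ⟨h.1, h.2.1, h.2.2⟩

-- str.find(sub, pos) = -1 ↔ no occurrence from pos on (0 ≤ pos ≤ len)
theorem ff_none (cs sub : List Char) (pos : Int) (h0 : 0 ≤ pos) (hn : pos ≤ (cs.length : Int)) :
    PySem.Chars.findFrom cs sub pos = -1 ↔ ¬ sub <:+: cs.drop pos.toNat := by
  have hcast : pos = ((pos.toNat : Nat) : Int) := (Int.toNat_of_nonneg h0).symm
  rw [hcast]
  exact PySem.Chars.findFrom_natCast_eq_neg_one_iff cs sub pos.toNat (by omega)

-- str.find(sub, pos) = -1 when pos is past the end of the string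
theorem ff_past (cs sub : List Char) (pos : Int) (hn : (cs.length : Int) < pos) :
    PySem.Chars.findFrom cs sub pos = -1 := by
  simp only [PySem.Chars.findFrom]
  split_ifs with h1 h2 h3 h4 h5 h6 <;> omega

-- when no '}}' occurs at or after pos, A can never return
theorem aloop_noClose (cs : List Char) : ∀ (fuel : Nat) (pos d : Int),
    (cs.length - pos.toNat) ≤ fuel → 0 ≤ pos →
    ¬ (['}','}'] <:+: cs.drop pos.toNat) →
    pyALoop cs pos d = none := by
  intro fuel
  induction fuel with
  | zero =>
    intro pos d hf hp _
    rw [pyALoop]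
    have hlt : ¬ (pos < (cs.length : Int) - 1) := by omega
    simp [hlt]
  | succ f ih =>
    intro pos d hf hp hc
    rw [pyALoop]
    by_cases hlt : pos < (cs.length : Int) - 1
    · have hcl : pyStartswith2 cs ['}','}'] pos = false := by
        rw [Bool.eq_false_iff, Ne, sw_iff cs _ pos hp]
        intro hpre
        exact hc (prefix_drop_mono cs _ pos.toNat pos.toNat le_rfl hpre)
      by_cases hop : pyStartswith2 cs ['{','{'] pos = true
      · simp only [hlt, if_true, hop]
        exact ih (pos + 2) (d + 1) (by omega) (by omega)
          (fun hcon => hc (infix_drop_le cs _ pos.toNat (pos + 2).toNat (by omega) hcon))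
      · simp only [hlt, if_true, Bool.not_eq_true] at hop ⊢
        simp only [hop, Bool.false_eq_true, if_false, hcl, Bool.false_and, if_false]
        exact ih (pos + 1) d (by omega) (by omega)
          (fun hcon => hc (infix_drop_le cs _ pos.toNat (pos + 1).toNat (by omega) hcon))
    · simp [hlt]

-- bounds on B's recursive matcher: a returned index lies in (pos+1, n]
theorem closeB_bounds (cs : List Char) : ∀ (fuel : Nat) (pos : Int) (e : Int),
    0 ≤ pos → pos ≤ (cs.length : Int) →
    pyCloseB cs pos fuel = some e → pos + 2 ≤ e ∧ e ≤ (cs.length : Int) := by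
  intro fuel
  induction fuel with
  | zero => intro pos e _ _ h; simp [pyCloseB] at h
  | succ f ih =>
    intro pos e h0 hn heq
    simp only [pyCloseB] at heq
    by_cases hj : PySem.Chars.findFrom cs ['}','}'] pos = -1
    · simp [hj] at heq
    · obtain ⟨hjge, hjpre, _⟩ := ff_facts cs _ pos h0 hn hj
      have hjub : (PySem.Chars.findFrom cs ['}','}'] pos).toNat + 2 ≤ cs.length := by
        simpa using found_ub cs _ _ (by simp) hjpre
      by_cases hk : (PySem.Chars.findFrom cs ['{','{'] pos ≠ -1 ∧
          PySem.Chars.findFrom cs ['{','{'] pos < PySem.Chars.findFrom cs ['}','}'] pos)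
      · obtain ⟨hkge, hkpre, _⟩ := ff_facts cs _ pos h0 hn hk.1
        have hkub : (PySem.Chars.findFrom cs ['{','{'] pos).toNat + 2 ≤ cs.length := by
          simpa using found_ub cs _ _ (by simp) hkpre
        rw [if_neg hj, if_pos hk] at heq
        cases hin : pyCloseB cs (PySem.Chars.findFrom cs ['{','{'] pos + 2) f with
        | none => rw [hin] at heq; simp at heq
        | some e1 =>
          rw [hin] at heq
          have hb1 := ih _ e1 (by omega) (by omega) hin
          have hb2 := ih e1 e (by omega) (by omega) heq
          omega
      · rw [if_neg hj, if_neg hk] at heq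
        injection heq with h
        omega

-- main invariant: A's loop at depth d ≥ 1 equals B's recursive matcher (plus continuation)
theorem main_inv (cs : List Char) : ∀ (fuel : Nat) (pos d : Int),
    0 ≤ pos → pos ≤ (cs.length : Int) → 1 ≤ d →
    (cs.length - pos.toNat) + 1 ≤ fuel →
    pyALoop cs pos d = (match pyCloseB cs pos fuel with
      | none => none
      | some e => if d = 1 then some e else pyALoop cs e (d - 1)) := by
  intro fuel
  induction fuel with
  | zero => intro pos d h0 hn hd hf; omega
  | succ f ih =>
    intro pos d h0 hn hd hf
    simp only [pyCloseB]
    by_cases hj : PySem.Chars.findFrom cs ['}','}'] pos = -1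
    · rw [if_pos hj]
      exact aloop_noClose cs (cs.length - pos.toNat) pos d le_rfl h0
        ((ff_none cs _ pos h0 hn).mp hj)
    · rw [if_neg hj]
      obtain ⟨hjge, hjpre, hjmin⟩ := ff_facts cs _ pos h0 hn hj
      have hjub : (PySem.Chars.findFrom cs ['}','}'] pos).toNat + 2 ≤ cs.length := by
        simpa using found_ub cs _ _ (by simp) hjpre
      by_cases hk : (PySem.Chars.findFrom cs ['{','{'] pos ≠ -1 ∧
          PySem.Chars.findFrom cs ['{','{'] pos < PySem.Chars.findFrom cs ['}','}'] pos)
      · -- the next token is a '{{' at k: A pushes a level, B recurses into the nested template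
        rw [if_pos hk]
        obtain ⟨hkge, hkpre, hkmin⟩ := ff_facts cs _ pos h0 hn hk.1
        have hkub : (PySem.Chars.findFrom cs ['{','{'] pos).toNat + 2 ≤ cs.length := by
          simpa using found_ub cs _ _ (by simp) hkpre
        set k := PySem.Chars.findFrom cs ['{','{'] pos with hkdef
        have hskip : pyALoop cs pos d = pyALoop cs k d := by
          have := aloop_skip cs d (k.toNat - pos.toNat) pos h0 (by
            intro r hr1 hr2
            refine ⟨hkmin r hr1 (by omega), fun _ => hjmin r hr1 (by omega)⟩)
          rw [this]; congr 1; omega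
        rw [hskip, pyALoop]
        have hlt : k < (cs.length : Int) - 1 := by omega
        have hsw : pyStartswith2 cs ['{','{'] k = true := by
          rw [sw_iff cs _ k (by omega)]; exact hkpre
        rw [if_pos hlt, if_pos hsw]
        have hih1 := ih (k + 2) (d + 1) (by omega) (by omega) (by omega) (by omega)
        cases hin : pyCloseB cs (k + 2) f with
        | none => rw [hin] at hih1; simpa [hin] using hih1
        | some e1 =>
          rw [hin] at hih1
          have hb1 := closeB_bounds cs f (k + 2) e1 (by omega) (by omega) hin
          have hd1 : ¬ (d + 1 = 1) := by omega
          simp only [if_neg hd1, add_sub_cancel_right] at hih1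
          have hih2 := ih e1 d (by omega) (by omega) hd (by omega)
          simp only [hih1, hih2]
      · -- the next token is a '}}' at j: A pops the level, B returns j + 2
        rw [if_neg hk]
        set j := PySem.Chars.findFrom cs ['}','}'] pos with hjdef
        have hnopen : ∀ r : Nat, pos.toNat ≤ r → r < j.toNat → ¬ (['{','{'] <+: cs.drop r) := by
          intro r hr1 hr2
          by_cases hkk : PySem.Chars.findFrom cs ['{','{'] pos = -1
          · intro hpre
            exact (ff_none cs _ pos h0 hn).mp hkk
              (prefix_drop_mono cs _ pos.toNat r hr1 hpre)
          · have hjk : j ≤ PySem.Chars.findFrom cs ['{','{'] pos := by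
              rcases not_and_or.mp hk with h | h
              · exact absurd hkk (by simpa using h)
              · omega
            exact (ff_facts cs _ pos h0 hn hkk).2.2 r hr1 (by omega)
        have hskip : pyALoop cs pos d = pyALoop cs j d := by
          have := aloop_skip cs d (j.toNat - pos.toNat) pos h0 (by
            intro r hr1 hr2
            exact ⟨hnopen r hr1 (by omega), fun _ => hjmin r hr1 (by omega)⟩)
          rw [this]; congr 1; omega
        rw [hskip, pyALoop]
        have hlt : j < (cs.length : Int) - 1 := by omega
        have hswo : pyStartswith2 cs ['{','{'] j = false := by
          rw [Bool.eq_false_iff, Ne, sw_iff cs _ j (by omega)]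
          exact not_open_at_close cs j.toNat hjpre
        have hswc : pyStartswith2 cs ['}','}'] j = true := by
          rw [sw_iff cs _ j (by omega)]; exact hjpre
        have hdpos : (decide (d > 0)) = true := by simp; omega
        rw [if_pos hlt, if_neg (by simp [hswo]), if_pos (by simp [hswc, hdpos])]
        by_cases hd1 : d = 1
        · rw [if_pos (show d - 1 = 0 by omega)]; simp [hd1]
        · rw [if_neg (show ¬ d - 1 = 0 by omega)]; simp [hd1]

-- ===== VERDICT (by name: the statement is the Claim_ definition above) =====
theorem find_balanced_template_end_py_spec : Claim_equal_find_balanced_template_end_py := by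
  intro text start _ hpre
  have h0 : (0:Int) ≤ start := hpre
  unfold Spec_find_balanced_template_end_py find_balanced_template_end_py find_balanced_template_end_py_alt
  simp only
  by_cases hbig : (text.toList.length : Int) < start
  · rw [ff_past text.toList _ start hbig, if_pos rfl, pyALoop]
    have hlt : ¬ (start < (text.toList.length : Int) - 1) := by omega
    rw [if_neg hlt]
  · have hle : start ≤ (text.toList.length : Int) := by omega
    by_cases hi : PySem.Chars.findFrom text.toList ['{','{'] start = -1
    · rw [if_pos hi]
      have hno := (ff_none text.toList _ start h0 hle).mp hi
      have hskip := aloop_skip text.toList 0 (text.toList.length - start.toNat) start h0 (by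
        intro r hr1 hr2
        refine ⟨fun hpre2 => hno (prefix_drop_mono text.toList _ start.toNat r hr1 hpre2),
          fun h => absurd h (by omega)⟩)
      rw [hskip, pyALoop]
      have hlt : ¬ (start + ((text.toList.length - start.toNat : Nat) : Int) <
          (text.toList.length : Int) - 1) := by omega
      rw [if_neg hlt]
    · rw [if_neg hi]
      obtain ⟨hige, hipre, himin⟩ := ff_facts text.toList _ start h0 hle hi
      have hiub : (PySem.Chars.findFrom text.toList ['{','{'] start).toNat + 2 ≤
          text.toList.length := by
        simpa using found_ub text.toList _ _ (by simp) hipre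
      set i := PySem.Chars.findFrom text.toList ['{','{'] start with hidef
      have hskip : pyALoop text.toList start 0 = pyALoop text.toList i 0 := by
        have := aloop_skip text.toList 0 (i.toNat - start.toNat) start h0 (by
          intro r hr1 hr2
          refine ⟨himin r hr1 (by omega), fun h => absurd h (by omega)⟩)
        rw [this]; congr 1; omega
      rw [hskip, pyALoop]
      have hlt : i < (text.toList.length : Int) - 1 := by omega
      have hsw : pyStartswith2 text.toList ['{','{'] i = true := by
        rw [sw_iff text.toList _ i (by omega)]; exact hipre
      rw [if_pos hlt, if_pos hsw]
      have hmain := main_inv text.toList (text.toList.length + 1) (i + 2) 1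
        (by omega) (by omega) le_rfl (by omega)
      simp only [zero_add]
      rw [hmain]
      cases hres : pyCloseB text.toList (i + 2) (text.toList.length + 1) with
      | none => simp
      | some e => simp
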